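-- pv_equiv track=rewrite | github.com/Santhosh-D-27/doc_processor | ingestor/main.py | decide_priority
-- ===== SOURCE A (Python) =====
-- from enum import IntEnum
-- from typing import Tuple, Optional
--
-- class Priority(IntEnum):
--     CRITICAL = 100
--     HIGH = 80
--     MEDIUM = 50
--     LOW = 20
--     BULK = 10
--
-- def decide_priority(file_size: int, sender: str = None) -> Tuple[int, str]:
--     if sender:
--         sender_lower = sender.lower()
--         if any(title in sender_lower for title in ["ceo", "director", "vp"]):
--             return Priority.CRITICAL, f"Executive sender: {sender}"
--         elif any(title in sender_lower for title in ["manager", "lead"]):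
--             return Priority.HIGH, f"Management sender: {sender}"
--
--     if file_size > 5_000_000:
--         return Priority.HIGH, f"Large file: {file_size} bytes"
--     elif file_size > 1_000_000:
--         return Priority.MEDIUM, f"Medium file: {file_size} bytes"
--     else:
--         return Priority.LOW, f"Standard priority: {file_size} bytes"
-- ===== SOURCE B (Python) =====
-- TITLE_RANK = {"ceo": 0, "director": 0, "vp": 0, "manager": 1, "lead": 1}
-- SENDER_CLASSES = [(100, "Executive"), (80, "Management")]
-- SIZE_CLASSES = [(20, "Standard priority"), (50, "Medium file"), (80, "Large file")]
--
-- def decide_priority(file_size: int, sender: str = None):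
--     if sender:
--         s = sender.lower()
--         ranks = {r for t, r in TITLE_RANK.items() if t in s}
--         if ranks:
--             pri, label = SENDER_CLASSES[min(ranks)]
--             return pri, f"{label} sender: {sender}"
--     idx = sum(file_size > t for t in (1_000_000, 5_000_000))
--     pri, label = SIZE_CLASSES[idx]
--     return pri, f"{label}: {file_size} bytes"
-- ===== Notes on version B (the rewrite author's own statement) =====
-- stated objective: alternative
-- what changed: Replaces A's short-circuit if/elif cascade with a table-driven scheme: a title->rank dict whose matching ranks are gathered into a set and resolved by min(), and a size classification computed arithmetically by counting exceeded thresholds and indexing a class table.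
import Mathlib
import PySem

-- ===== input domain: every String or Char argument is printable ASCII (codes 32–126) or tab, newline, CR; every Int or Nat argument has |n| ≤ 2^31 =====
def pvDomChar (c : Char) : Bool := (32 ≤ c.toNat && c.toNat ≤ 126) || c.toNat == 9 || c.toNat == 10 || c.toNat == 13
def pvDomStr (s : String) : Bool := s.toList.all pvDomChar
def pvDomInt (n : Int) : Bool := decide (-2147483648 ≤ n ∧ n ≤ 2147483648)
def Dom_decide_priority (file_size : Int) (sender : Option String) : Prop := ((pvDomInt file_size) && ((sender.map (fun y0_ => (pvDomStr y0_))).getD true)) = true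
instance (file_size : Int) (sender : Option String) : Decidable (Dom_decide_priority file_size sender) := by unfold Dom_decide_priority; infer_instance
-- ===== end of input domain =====

-- B replaces A's if/elif cascade by a title->rank table resolved with set-gather + min and an arithmetic threshold count indexing a size-class table; equivalence of return values is proved on Dom.


-- ===== PORT A =====
def decide_priority (file_size : Int) (sender : Option String) : Int × String :=
  let fromSender : Option (Int × String) :=
    match sender with
    | none => none
    | some s =>
      if s = "" then none
      else
        let sender_lower := PySem.Str.lower s
        if ["ceo", "director", "vp"].any (fun title => PySem.Str.isIn title sender_lower) then
          some (100, "Executive sender: " ++ s)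
        else if ["manager", "lead"].any (fun title => PySem.Str.isIn title sender_lower) then
          some (80, "Management sender: " ++ s)
        else none
  match fromSender with
  | some r => r
  | none =>
    if file_size > 5000000 then (80, "Large file: " ++ PySem.Int.toStr file_size ++ " bytes")
    else if file_size > 1000000 then (50, "Medium file: " ++ PySem.Int.toStr file_size ++ " bytes")
    else (20, "Standard priority: " ++ PySem.Int.toStr file_size ++ " bytes")

-- ===== PORT B =====
-- TITLE_RANK dict (insertion order), SENDER_CLASSES and SIZE_CLASSES tables from Source B
def pvTitleRank : List (String × Int) := [("ceo", 0), ("director", 0), ("vp", 0), ("manager", 1), ("lead", 1)]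
def pvSenderClasses : List (Int × String) := [(100, "Executive"), (80, "Management")]
def pvSizeClasses : List (Int × String) := [(20, "Standard priority"), (50, "Medium file"), (80, "Large file")]

def decide_priority_alt (file_size : Int) (sender : Option String) : Int × String :=
  let fromSender : Option (Int × String) :=
    match sender with
    | none => none
    | some str =>
      if str = "" then none
      else
        let s := PySem.Str.lower str
        -- ranks = {r for t, r in TITLE_RANK.items() if t in s}
        let ranks : PySem.Set Int :=
          PySem.Set.ofList ((pvTitleRank.filter (fun p => PySem.Str.isIn p.1 s)).map Prod.snd)
        if ranks = [] then none
        else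
          -- pri, label = SENDER_CLASSES[min(ranks)]
          let idx := (PySem.List.min? ranks (fun x => x)).getD 0
          let pl := (PySem.List.pyGet? pvSenderClasses idx).getD (0, "")
          some (pl.1, pl.2 ++ " sender: " ++ str)
  match fromSender with
  | some r => r
  | none =>
    -- idx = sum(file_size > t for t in (1_000_000, 5_000_000))
    let idx : Int := [(1000000 : Int), 5000000].foldl (fun acc t => acc + (if file_size > t then 1 else 0)) 0
    let pl := (PySem.List.pyGet? pvSizeClasses idx).getD (0, "")
    (pl.1, pl.2 ++ ": " ++ PySem.Int.toStr file_size ++ " bytes")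

-- ===== PRECONDITION & SPEC =====
def Spec_decide_priority (file_size : Int) (sender : Option String) (out : Int × String) : Prop := out = decide_priority_alt file_size sender
instance (file_size : Int) (sender : Option String) (out : Int × String) : Decidable (Spec_decide_priority file_size sender out) := by unfold Spec_decide_priority; infer_instance

-- ===== CLAIM =====
def Claim_equal_decide_priority : Prop := ∀ (file_size : Int) (sender : Option String), Dom_decide_priority file_size sender → Spec_decide_priority file_size sender (decide_priority file_size sender)

-- ===== LEMMAS AND PROOFS =====

-- ===== VERDICT =====
theorem decide_priority_spec : Claim_equal_decide_priority := by
  intro file_size sender _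
  unfold Spec_decide_priority decide_priority decide_priority_alt
  have sizeCase : ∀ (r : Int × String), r = (if file_size > 5000000 then ((80 : Int), "Large file: " ++ PySem.Int.toStr file_size ++ " bytes")
      else if file_size > 1000000 then ((50 : Int), "Medium file: " ++ PySem.Int.toStr file_size ++ " bytes")
      else ((20 : Int), "Standard priority: " ++ PySem.Int.toStr file_size ++ " bytes")) →
      r = (let idx : Int := [(1000000 : Int), 5000000].foldl (fun acc t => acc + (if file_size > t then 1 else 0)) 0
           let pl := (PySem.List.pyGet? pvSizeClasses idx).getD (0, "")
           (pl.1, pl.2 ++ ": " ++ PySem.Int.toStr file_size ++ " bytes")) := by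
    intro r hr
    by_cases h5 : (5000000 : Int) < file_size
    · have h1 : (1000000 : Int) < file_size := by omega
      simp [h5, h1, hr, pvSizeClasses, PySem.List.pyGet?, PySem.List.pyIdx?]
    · by_cases h1 : (1000000 : Int) < file_size <;>
        simp [h5, h1, hr, pvSizeClasses, PySem.List.pyGet?, PySem.List.pyIdx?]
  cases sender with
  | none => exact sizeCase _ rfl
  | some s =>
    by_cases hs : s = ""
    · simp only [if_pos hs]
      exact sizeCase _ rfl
    · simp only [if_neg hs]
      by_cases hA1 : PySem.Str.isIn "ceo" (PySem.Str.lower s) <;>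
      by_cases hA2 : PySem.Str.isIn "director" (PySem.Str.lower s) <;>
      by_cases hA3 : PySem.Str.isIn "vp" (PySem.Str.lower s) <;>
      by_cases hB1 : PySem.Str.isIn "manager" (PySem.Str.lower s) <;>
      by_cases hB2 : PySem.Str.isIn "lead" (PySem.Str.lower s) <;>
      · simp [PySem.Str.isIn, PySem.Str.lower] at hA1 hA2 hA3 hB1 hB2
        by_cases h5 : (5000000 : Int) < file_size
        · have h1 : (1000000 : Int) < file_size := by omega
          simp [pvTitleRank, pvSenderClasses, pvSizeClasses, PySem.Str.isIn, PySem.Str.lower,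
                PySem.Set.ofList, PySem.Set.add, PySem.Set.contains, PySem.List.min?,
                PySem.List.pyGet?, PySem.List.pyIdx?, hA1, hA2, hA3, hB1, hB2, h5, h1]
        · by_cases h1 : (1000000 : Int) < file_size <;>
            simp [pvTitleRank, pvSenderClasses, pvSizeClasses, PySem.Str.isIn, PySem.Str.lower,
                  PySem.Set.ofList, PySem.Set.add, PySem.Set.contains, PySem.List.min?,
                  PySem.List.pyGet?, PySem.List.pyIdx?, hA1, hA2, hA3, hB1, hB2, h5, h1]
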